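-- pv_equiv track=rewrite | github.com/bht1027/mindbridge | pipeline.py | _humanize_reflection_text
-- ===== SOURCE A (Python) =====
-- def _humanize_reflection_text(text: str) -> str:
--     cleaned = text.strip()
--     replacements = (
--         ("The user is ", "You are "),
--         ("the user is ", "you are "),
--         ("User is ", "You are "),
--         ("The user needs ", "You need "),
--         ("the user needs ", "you need "),
--         ("User needs ", "You need "),
--         ("The user feels ", "You feel "),
--         ("the user feels ", "you feel "),
--         ("User feels ", "You feel "),
--         ("The user has ", "You have "),
--         ("the user has ", "you have "),
--         ("User has ", "You have "),
--     )
--     for source, target in replacements: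
--         cleaned = cleaned.replace(source, target)
--     return cleaned
-- ===== SOURCE B (Python) =====
-- def _humanize_reflection_text(text: str) -> str:
--     cleaned = text.strip()
--     pairs = (
--         ("The user is ", "You are "),
--         ("the user is ", "you are "),
--         ("User is ", "You are "),
--         ("The user needs ", "You need "),
--         ("the user needs ", "you need "),
--         ("User needs ", "You need "),
--         ("The user feels ", "You feel "),
--         ("the user feels ", "you feel "),
--         ("User feels ", "You feel "),
--         ("The user has ", "You have "),
--         ("the user has ", "you have "),
--         ("User has ", "You have "),
--     )
--     pieces = []
--     i = 0
--     n = len(cleaned)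
--     while i < n:
--         for source, target in pairs:
--             if cleaned.startswith(source, i):
--                 pieces.append(target)
--                 i += len(source)
--                 break
--         else:
--             pieces.append(cleaned[i])
--             i += 1
--     return "".join(pieces)
-- ===== Notes on version B (the rewrite author's own statement) =====
-- stated objective: alternative
-- what changed: Replaces the cascade of 12 full-string str.replace passes by a single left-to-right scan that at each position tries the 12 source patterns in order and emits the matching target (or the current character), proved sound because no target can create or complete a new pattern occurrence.
import Mathlib
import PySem

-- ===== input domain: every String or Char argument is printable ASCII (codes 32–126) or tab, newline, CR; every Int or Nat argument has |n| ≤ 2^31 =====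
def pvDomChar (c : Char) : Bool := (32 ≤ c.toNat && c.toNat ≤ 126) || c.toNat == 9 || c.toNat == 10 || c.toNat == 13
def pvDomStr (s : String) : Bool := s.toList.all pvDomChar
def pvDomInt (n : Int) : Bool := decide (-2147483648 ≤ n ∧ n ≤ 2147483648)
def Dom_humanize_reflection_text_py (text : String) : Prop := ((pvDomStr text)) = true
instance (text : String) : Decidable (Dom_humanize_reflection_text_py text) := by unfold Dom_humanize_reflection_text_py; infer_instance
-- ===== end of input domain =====

-- B replaces A's cascade of 12 sequential full-string replaces by one left-to-right scan that tries the
-- 12 source patterns at each position ("alternative": different algorithm, same exact output).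

-- ===== PORT A =====
-- the tuple of (source, target) pairs from A, in A's order
def pvReplacementsA : List (String × String) :=
  [("The user is ", "You are "),
   ("the user is ", "you are "),
   ("User is ", "You are "),
   ("The user needs ", "You need "),
   ("the user needs ", "you need "),
   ("User needs ", "You need "),
   ("The user feels ", "You feel "),
   ("the user feels ", "you feel "),
   ("User feels ", "You feel "),
   ("The user has ", "You have "),
   ("the user has ", "you have "),
   ("User has ", "You have ")]

-- A: cleaned = text.strip(); for source, target in replacements: cleaned = cleaned.replace(source, target)
def humanize_reflection_text_py (text : String) : String :=
  pvReplacementsA.foldl (fun cleaned pr => PySem.Str.replace cleaned pr.1 pr.2) (PySem.Str.strip text)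

-- ===== PORT B =====
-- the same pairs, on the char-list level (B scans characters)
def pvPairsB : List (List Char × List Char) :=
  [("The user is ".toList, "You are ".toList),
   ("the user is ".toList, "you are ".toList),
   ("User is ".toList, "You are ".toList),
   ("The user needs ".toList, "You need ".toList),
   ("the user needs ".toList, "you need ".toList),
   ("User needs ".toList, "You need ".toList),
   ("The user feels ".toList, "You feel ".toList),
   ("the user feels ".toList, "you feel ".toList),
   ("User feels ".toList, "You feel ".toList),
   ("The user has ".toList, "You have ".toList),
   ("the user has ".toList, "you have ".toList),
   ("User has ".toList, "You have ".toList)]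

-- B's single scan: at each position try the pairs in order (cleaned.startswith(source, i));
-- on a match emit the target and skip len(source) chars, else emit the current char.
def pvScan : List Char → List Char
  | [] => []
  | c :: t =>
    match pvPairsB.find? (fun pr => pr.1.isPrefixOf (c :: t)) with
    | some pr => pr.2 ++ pvScan (List.drop (pr.1.length - 1) t)
    | none => c :: pvScan t
termination_by l => l.length
decreasing_by
  · simp only [List.length_cons, List.length_drop]; omega
  · simp only [List.length_cons]; omega

def humanize_reflection_text_py_alt (text : String) : String :=
  String.ofList (pvScan (PySem.Str.strip text).toList)

-- ===== PRECONDITION & SPEC =====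
def Spec_humanize_reflection_text_py (text : String) (out : String) : Prop := out = humanize_reflection_text_py_alt text
instance (text : String) (out : String) : Decidable (Spec_humanize_reflection_text_py text out) := by unfold Spec_humanize_reflection_text_py; infer_instance

-- ===== CLAIM (what is proved, stated in full; the proofs are below) =====
def Claim_equal_humanize_reflection_text_py : Prop := ∀ (text : String), Dom_humanize_reflection_text_py text → Spec_humanize_reflection_text_py text (humanize_reflection_text_py text)

-- ===== LEMMAS AND PROOFS =====

-- clean reformulation of Python str.replace for a nonempty pattern: greedy left-to-right rewriting
def pvRep (old new : List Char) : List Char → List Char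
  | [] => []
  | c :: t =>
    if old ≠ [] ∧ old.isPrefixOf (c :: t) then new ++ pvRep old new (List.drop (old.length - 1) t)
    else c :: pvRep old new t
termination_by l => l.length
decreasing_by
  · simp only [List.length_cons, List.length_drop]; omega
  · simp only [List.length_cons]; omega

theorem pvRep_nil (old new : List Char) : pvRep old new [] = [] := by
  rw [pvRep]

theorem pvRep_cons (old new : List Char) (c : Char) (t : List Char) :
    pvRep old new (c :: t) =
      if old ≠ [] ∧ old.isPrefixOf (c :: t) then new ++ pvRep old new (List.drop (old.length - 1) t)
      else c :: pvRep old new t := by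
  rw [pvRep]

theorem pvScan_nil : pvScan [] = [] := by
  rw [pvScan]

theorem pvScan_cons (c : Char) (t : List Char) :
    pvScan (c :: t) =
      match pvPairsB.find? (fun pr => pr.1.isPrefixOf (c :: t)) with
      | some pr => pr.2 ++ pvScan (List.drop (pr.1.length - 1) t)
      | none => c :: pvScan t := by
  rw [pvScan]

theorem pvGo_eq (old new : List Char) (hold : old ≠ []) :
    ∀ (fuel : Nat) (l acc : List Char), l.length ≤ fuel →
      PySem.Chars.replace.go old new fuel l acc = acc.reverse ++ pvRep old new l := by
  intro fuel
  induction fuel with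
  | zero =>
    intro l acc hl
    have hnil : l = [] := List.eq_nil_of_length_eq_zero (Nat.le_zero.mp hl)
    subst hnil
    rw [PySem.Chars.replace.go.eq_def]
    simp [pvRep_nil]
  | succ n ih =>
    intro l acc hl
    cases l with
    | nil =>
      rw [PySem.Chars.replace.go.eq_def]
      simp [pvRep_nil]
    | cons c t =>
      rw [PySem.Chars.replace.go.eq_def]
      show (if old.isPrefixOf (c :: t) = true then
              PySem.Chars.replace.go old new n (List.drop old.length (c :: t)) (new.reverse ++ acc)
            else PySem.Chars.replace.go old new n t (c :: acc))
          = acc.reverse ++ pvRep old new (c :: t)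
      have hop : 0 < old.length := List.length_pos_iff.mpr hold
      by_cases hp : old.isPrefixOf (c :: t) = true
      · rw [if_pos hp]
        have hlen : (List.drop old.length (c :: t)).length ≤ n := by
          simp only [List.length_drop, List.length_cons]
          simp only [List.length_cons] at hl
          omega
        rw [ih _ _ hlen, pvRep_cons, if_pos ⟨hold, hp⟩]
        have hdd : List.drop old.length (c :: t) = List.drop (old.length - 1) t := by
          cases old with
          | nil => exact absurd rfl hold
          | cons o os => simp [List.drop_succ_cons]
        rw [hdd]
        simp [List.reverse_append, List.append_assoc]
      · rw [if_neg hp]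
        have hlen : t.length ≤ n := by
          simp only [List.length_cons] at hl; omega
        rw [ih _ _ hlen, pvRep_cons, if_neg (by rintro ⟨-, h⟩; exact hp h)]
        simp

theorem pvReplace_eq_pvRep (old new s : List Char) (hold : old ≠ []) :
    PySem.Chars.replace s old new = pvRep old new s := by
  unfold PySem.Chars.replace
  rw [if_neg (by simpa [List.isEmpty_iff] using hold)]
  rw [pvGo_eq old new hold s.length s [] le_rfl]
  simp

-- if p is not a prefix of v and v is not a prefix of p, then p is not a prefix of v ++ u for any u
theorem pvNotPrefixAppend {p v : List Char} (u : List Char)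
    (h1 : ¬ p <+: v) (h2 : ¬ v <+: p) : ¬ p <+: (v ++ u) := by
  intro h
  rcases List.prefix_or_prefix_of_prefix h (List.prefix_append v u) with h' | h'
  · exact h1 h'
  · exact h2 h'

-- pvRep does not touch a prefix block in which the pattern never starts
theorem pvRep_append (old new : List Char) :
    ∀ (q u : List Char), (∀ j, j < q.length → ¬ old <+: (List.drop j q ++ u)) →
      pvRep old new (q ++ u) = q ++ pvRep old new u := by
  intro q
  induction q with
  | nil => intro u _; rfl
  | cons c q' ih =>
    intro u h
    have h0 : ¬ old <+: (c :: (q' ++ u)) := by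
      have := h 0 (by simp)
      simpa using this
    rw [List.cons_append, pvRep_cons, if_neg (by
      rintro ⟨-, hp⟩
      exact h0 (List.isPrefixOf_iff_prefix.mp hp))]
    rw [ih u (fun j hj => by
      have := h (j + 1) (by simp only [List.length_cons]; omega)
      simpa [List.drop_succ_cons] using this)]
    rfl

-- pvRep rewrites a pattern occurrence at the head
theorem pvRep_head (old new y : List Char) (hold : old ≠ []) :
    pvRep old new (old ++ y) = new ++ pvRep old new y := by
  cases old with
  | nil => exact absurd rfl hold
  | cons o os =>
    rw [List.cons_append, pvRep_cons, if_pos]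
    · have hd : List.drop ((o :: os).length - 1) (os ++ y) = y := by
        simp only [List.length_cons, Nat.add_sub_cancel]
        exact List.drop_left
      rw [hd]
    · exact ⟨List.cons_ne_nil o os,
        List.isPrefixOf_iff_prefix.mpr (by rw [← List.cons_append]; exact List.prefix_append _ _)⟩

-- a Y/y-free prefix of a pvRep result was already a prefix of the input
theorem pvRep_prefix_back (old new : List Char) (_hold : old ≠ [])
    (hnew : new.head? = some 'Y' ∨ new.head? = some 'y') :
    ∀ (n : Nat) (w : List Char), w.length ≤ n → ∀ (q : List Char),
      (∀ c ∈ q, c ≠ 'Y' ∧ c ≠ 'y') → q <+: pvRep old new w → q <+: w := by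
  intro n
  induction n with
  | zero =>
    intro w hw q _ hpre
    have hnil : w = [] := List.eq_nil_of_length_eq_zero (Nat.le_zero.mp hw)
    subst hnil
    rwa [pvRep_nil] at hpre
  | succ n ih =>
    intro w hw q hq hpre
    cases w with
    | nil => rwa [pvRep_nil] at hpre
    | cons c t =>
      rw [pvRep_cons] at hpre
      by_cases h : old ≠ [] ∧ old.isPrefixOf (c :: t)
      · rw [if_pos h] at hpre
        cases q with
        | nil => exact List.nil_prefix
        | cons d q' =>
          exfalso
          cases new with
          | nil => simp at hnew
          | cons e new' =>
            have hde : d = e := by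
              rw [List.cons_append] at hpre
              exact (List.cons_prefix_cons.mp hpre).1
            have hd := hq d (List.mem_cons_self)
            rcases hnew with h' | h' <;>
              (simp only [List.head?_cons, Option.some.injEq] at h'; subst h'; subst hde;
               simp at hd)
      · rw [if_neg h] at hpre
        cases q with
        | nil => exact List.nil_prefix
        | cons d q' =>
          obtain ⟨hdc, hq'⟩ := List.cons_prefix_cons.mp hpre
          subst hdc
          have ht : t.length ≤ n := by simp only [List.length_cons] at hw; omega
          exact List.cons_prefix_cons.mpr
            ⟨rfl, ih t ht q' (fun x hx => hq x (List.mem_cons_of_mem _ hx)) hq'⟩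

-- the cascade as a fold of pvRep
def pvFold (L : List (List Char × List Char)) (l : List Char) : List Char :=
  L.foldl (fun acc pr => pvRep pr.1 pr.2 acc) l

theorem pvFold_nil : ∀ (L : List (List Char × List Char)), pvFold L [] = [] := by
  intro L
  induction L with
  | nil => rfl
  | cons pr L ih =>
    show pvFold L (pvRep pr.1 pr.2 []) = []
    rw [pvRep_nil]
    exact ih

-- the cascade keeps an unmatched head character
theorem pvFold_cons :
    ∀ (L : List (List Char × List Char)),
      (∀ pr ∈ L, pr.1 ≠ []) →
      (∀ pr ∈ L, ∀ c ∈ pr.1, c ≠ 'Y' ∧ c ≠ 'y') →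
      (∀ pr ∈ L, pr.2.head? = some 'Y' ∨ pr.2.head? = some 'y') →
      ∀ (c : Char) (w : List Char), (∀ pr ∈ L, ¬ pr.1 <+: (c :: w)) →
        pvFold L (c :: w) = c :: pvFold L w := by
  intro L
  induction L with
  | nil => intro _ _ _ c w _; rfl
  | cons pr L ih =>
    intro h1 hY hH c w hm
    have hstep : pvRep pr.1 pr.2 (c :: w) = c :: pvRep pr.1 pr.2 w := by
      rw [pvRep_cons, if_neg]
      rintro ⟨-, hp⟩
      exact hm pr (List.mem_cons_self) (List.isPrefixOf_iff_prefix.mp hp)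
    show pvFold L (pvRep pr.1 pr.2 (c :: w)) = c :: pvFold L (pvRep pr.1 pr.2 w)
    rw [hstep]
    apply ih (fun x hx => h1 x (List.mem_cons_of_mem _ hx))
      (fun x hx => hY x (List.mem_cons_of_mem _ hx))
      (fun x hx => hH x (List.mem_cons_of_mem _ hx))
    intro qr hqr hpref
    cases hq : qr.1 with
    | nil => exact h1 qr (List.mem_cons_of_mem _ hqr) hq
    | cons d p'' =>
      rw [hq] at hpref
      obtain ⟨hdc, hp''⟩ := List.cons_prefix_cons.mp hpref
      subst hdc
      have hback := pvRep_prefix_back pr.1 pr.2 (h1 pr List.mem_cons_self)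
        (hH pr List.mem_cons_self) w.length w le_rfl p''
        (fun x hx => hY qr (List.mem_cons_of_mem _ hqr) x (hq ▸ List.mem_cons_of_mem _ hx)) hp''
      exact hm qr (List.mem_cons_of_mem _ hqr) (hq ▸ List.cons_prefix_cons.mpr ⟨rfl, hback⟩)

-- the cascade passes over a block in which no pattern ever starts
theorem pvFold_append :
    ∀ (L : List (List Char × List Char)), (∀ pr ∈ L, pr.1 ≠ []) →
      ∀ (t z : List Char),
        (∀ pr ∈ L, ∀ j, j < t.length → ¬ pr.1 <+: List.drop j t ∧ ¬ List.drop j t <+: pr.1) →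
        pvFold L (t ++ z) = t ++ pvFold L z := by
  intro L
  induction L with
  | nil => intro _ t z _; rfl
  | cons pr L ih =>
    intro h1 t z hsep
    have hstep : pvRep pr.1 pr.2 (t ++ z) = t ++ pvRep pr.1 pr.2 z := by
      apply pvRep_append
      intro j hj
      obtain ⟨ha, hb⟩ := hsep pr (List.mem_cons_self) j hj
      exact pvNotPrefixAppend z ha hb
    show pvFold L (pvRep pr.1 pr.2 (t ++ z)) = t ++ pvFold L (pvRep pr.1 pr.2 z)
    rw [hstep]
    exact ih (fun x hx => h1 x (List.mem_cons_of_mem _ hx)) t _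
      (fun x hx => hsep x (List.mem_cons_of_mem _ hx))

-- the cascade rewrites a pattern occurrence at the head to its target
theorem pvFold_match :
    ∀ (L : List (List Char × List Char)) (p t : List Char),
      (∀ pr ∈ L, pr.1 ≠ []) →
      (∀ qr ∈ L, qr.1 ≠ p → ∀ j, j < p.length → ¬ qr.1 <+: List.drop j p ∧ ¬ List.drop j p <+: qr.1) →
      (∀ qr ∈ L, ∀ j, j < t.length → ¬ qr.1 <+: List.drop j t ∧ ¬ List.drop j t <+: qr.1) →
      (∀ qr ∈ L, qr.1 = p → qr.2 = t) →
      (p, t) ∈ L →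
      ∀ (y : List Char), pvFold L (p ++ y) = t ++ pvFold L y := by
  intro L
  induction L with
  | nil => intro p t _ _ _ _ hmem; cases hmem
  | cons qr L ih =>
    intro p t h1 hA hB huniq hmem y
    by_cases hqp : qr.1 = p
    · have hrt : qr.2 = t := huniq qr (List.mem_cons_self) hqp
      show pvFold L (pvRep qr.1 qr.2 (p ++ y)) = t ++ pvFold L (pvRep qr.1 qr.2 y)
      rw [hqp, hrt, pvRep_head p t y (hqp ▸ h1 qr (List.mem_cons_self))]
      exact pvFold_append L (fun x hx => h1 x (List.mem_cons_of_mem _ hx)) t _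
        (fun x hx => hB x (List.mem_cons_of_mem _ hx))
    · show pvFold L (pvRep qr.1 qr.2 (p ++ y)) = t ++ pvFold L (pvRep qr.1 qr.2 y)
      rw [pvRep_append qr.1 qr.2 p y
        (fun j hj => pvNotPrefixAppend y (hA qr (List.mem_cons_self) hqp j hj).1
          (hA qr (List.mem_cons_self) hqp j hj).2)]
      have hmem' : (p, t) ∈ L := by
        rcases List.mem_cons.mp hmem with h | h
        · exact absurd (congrArg Prod.fst h.symm) hqp
        · exact h
      exact ih p t (fun x hx => h1 x (List.mem_cons_of_mem _ hx))
        (fun x hx => hA x (List.mem_cons_of_mem _ hx))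
        (fun x hx => hB x (List.mem_cons_of_mem _ hx))
        (fun x hx => huniq x (List.mem_cons_of_mem _ hx)) hmem' _

-- decidable facts about the 12 fixed pairs
theorem pvFact_ne : ∀ pr ∈ pvPairsB, pr.1 ≠ [] := by decide
theorem pvFact_noY : ∀ pr ∈ pvPairsB, ∀ c ∈ pr.1, c ≠ 'Y' ∧ c ≠ 'y' := by
  have h : pvPairsB.all (fun pr => pr.1.all (fun c => !(c == 'Y') && !(c == 'y'))) = true := by
    decide
  intro pr hpr c hc
  have h1 := List.all_eq_true.mp h pr hpr
  have h2 : ∀ x ∈ pr.1, ¬x = 'Y' ∧ ¬x = 'y' := by simpa using h1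
  exact h2 c hc
theorem pvFact_head : ∀ pr ∈ pvPairsB, pr.2.head? = some 'Y' ∨ pr.2.head? = some 'y' := by decide
theorem pvFact_uniq : ∀ pr ∈ pvPairsB, ∀ qr ∈ pvPairsB, qr.1 = pr.1 → qr.2 = pr.2 := by decide
set_option maxHeartbeats 1000000 in
theorem pvBool_pat : pvPairsB.all (fun pr => pvPairsB.all (fun qr =>
    (qr.1 == pr.1) || (List.range pr.1.length).all (fun j =>
      !(qr.1.isPrefixOf (List.drop j pr.1)) && !((List.drop j pr.1).isPrefixOf qr.1)))) = true := by
  decide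

theorem pvFact_pat : ∀ pr ∈ pvPairsB, ∀ qr ∈ pvPairsB, qr.1 ≠ pr.1 →
    ∀ j, j < pr.1.length → ¬ qr.1 <+: List.drop j pr.1 ∧ ¬ List.drop j pr.1 <+: qr.1 := by
  intro pr hpr qr hqr hne j hj
  have h1 := List.all_eq_true.mp pvBool_pat pr hpr
  have h2 := List.all_eq_true.mp h1 qr hqr
  rw [Bool.or_eq_true] at h2
  rcases h2 with h2 | h2
  · exact absurd (by simpa using h2) hne
  · have h3 := List.all_eq_true.mp h2 j (List.mem_range.mpr hj)
    simp only [Bool.and_eq_true, Bool.not_eq_true'] at h3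
    constructor
    · intro hp
      rw [← List.isPrefixOf_iff_prefix] at hp
      rw [h3.1] at hp
      exact Bool.false_ne_true hp
    · intro hp
      rw [← List.isPrefixOf_iff_prefix] at hp
      rw [h3.2] at hp
      exact Bool.false_ne_true hp

set_option maxHeartbeats 1000000 in
theorem pvBool_tgt : pvPairsB.all (fun pr => pvPairsB.all (fun qr =>
    (List.range pr.2.length).all (fun j =>
      !(qr.1.isPrefixOf (List.drop j pr.2)) && !((List.drop j pr.2).isPrefixOf qr.1)))) = true := by
  decide

theorem pvFact_tgt : ∀ pr ∈ pvPairsB, ∀ qr ∈ pvPairsB,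
    ∀ j, j < pr.2.length → ¬ qr.1 <+: List.drop j pr.2 ∧ ¬ List.drop j pr.2 <+: qr.1 := by
  intro pr hpr qr hqr j hj
  have h1 := List.all_eq_true.mp pvBool_tgt pr hpr
  have h2 := List.all_eq_true.mp h1 qr hqr
  have h3 := List.all_eq_true.mp h2 j (List.mem_range.mpr hj)
  simp only [Bool.and_eq_true, Bool.not_eq_true'] at h3
  constructor
  · intro hp
    rw [← List.isPrefixOf_iff_prefix] at hp
    rw [h3.1] at hp
    exact Bool.false_ne_true hp
  · intro hp
    rw [← List.isPrefixOf_iff_prefix] at hp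
    rw [h3.2] at hp
    exact Bool.false_ne_true hp

-- the main equivalence on char lists: the cascade equals the single scan
theorem pvMain : ∀ (n : Nat) (l : List Char), l.length ≤ n → pvFold pvPairsB l = pvScan l := by
  intro n
  induction n with
  | zero =>
    intro l hl
    have hnil : l = [] := List.eq_nil_of_length_eq_zero (Nat.le_zero.mp hl)
    subst hnil
    rw [pvFold_nil, pvScan_nil]
  | succ n ih =>
    intro l hl
    cases l with
    | nil => rw [pvFold_nil, pvScan_nil]
    | cons c t =>
      cases hf : pvPairsB.find? (fun pr => pr.1.isPrefixOf (c :: t)) with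
      | none =>
        have hnm : ∀ pr ∈ pvPairsB, ¬ pr.1 <+: (c :: t) := by
          intro pr hpr
          have := List.find?_eq_none.mp hf pr hpr
          simpa [List.isPrefixOf_iff_prefix] using this
        rw [pvFold_cons pvPairsB pvFact_ne pvFact_noY pvFact_head c t hnm, pvScan_cons, hf]
        have ht : t.length ≤ n := by simp only [List.length_cons] at hl; omega
        rw [ih t ht]
      | some pr =>
        have hmem := List.mem_of_find?_eq_some hf
        have hps := List.find?_some hf
        have hpre : pr.1 <+: (c :: t) := List.isPrefixOf_iff_prefix.mp (by simpa using hps)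
        obtain ⟨y, hy⟩ := hpre
        have hne : pr.1 ≠ [] := pvFact_ne pr hmem
        have hop : 0 < pr.1.length := List.length_pos_iff.mpr hne
        have hdrop : List.drop (pr.1.length - 1) t = y := by
          have h1 : List.drop pr.1.length (c :: t) = y := by
            rw [← hy]; exact List.drop_left
          cases hp : pr.1 with
          | nil => exact absurd hp hne
          | cons o os =>
            rw [hp] at h1
            simpa [List.drop_succ_cons] using h1
        have hylen : y.length ≤ n := by
          have := congrArg List.length hy
          simp only [List.length_append, List.length_cons] at this
          simp only [List.length_cons] at hl
          omega
        have hmem' : (pr.1, pr.2) ∈ pvPairsB := by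
          rcases pr with ⟨a, b⟩; exact hmem
        rw [pvScan_cons, hf]
        show pvFold pvPairsB (c :: t) = pr.2 ++ pvScan (List.drop (pr.1.length - 1) t)
        rw [hdrop, ← hy,
          pvFold_match pvPairsB pr.1 pr.2 pvFact_ne (pvFact_pat pr hmem) (pvFact_tgt pr hmem)
            (pvFact_uniq pr hmem) hmem' y, ih y hylen]

-- String-level bridge: the fold of Str.replace computes on toList
theorem pvToListFold : ∀ (L : List (String × String)) (s : String),
    (L.foldl (fun cl pr => PySem.Str.replace cl pr.1 pr.2) s).toList
      = (L.map (fun pr => (pr.1.toList, pr.2.toList))).foldl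
          (fun acc pr => PySem.Chars.replace acc pr.1 pr.2) s.toList := by
  intro L
  induction L with
  | nil => intro s; rfl
  | cons pr L ih =>
    intro s
    simp only [List.foldl_cons, List.map_cons]
    rw [ih (PySem.Str.replace s pr.1 pr.2), PySem.Str.toList_replace]

set_option maxRecDepth 100000 in
theorem pvMapA : pvReplacementsA.map (fun pr => (pr.1.toList, pr.2.toList)) = pvPairsB := by
  simp only [pvReplacementsA, pvPairsB, List.map_cons, List.map_nil]

theorem pvFoldReplace_eq :
    ∀ (L : List (List Char × List Char)), (∀ pr ∈ L, pr.1 ≠ []) →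
      ∀ s, L.foldl (fun acc pr => PySem.Chars.replace acc pr.1 pr.2) s = pvFold L s := by
  intro L
  induction L with
  | nil => intro _ s; rfl
  | cons pr L ih =>
    intro h1 s
    show List.foldl _ (PySem.Chars.replace s pr.1 pr.2) L = pvFold L (pvRep pr.1 pr.2 s)
    rw [pvReplace_eq_pvRep pr.1 pr.2 s (h1 pr List.mem_cons_self)]
    exact ih (fun x hx => h1 x (List.mem_cons_of_mem _ hx)) _

-- ===== VERDICT (by name: the statement is the Claim_ definition above) =====
theorem humanize_reflection_text_py_spec : Claim_equal_humanize_reflection_text_py := by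
  intro text _
  unfold Spec_humanize_reflection_text_py humanize_reflection_text_py humanize_reflection_text_py_alt
  apply String.toList_inj.mp
  rw [String.toList_ofList, pvToListFold, pvMapA, pvFoldReplace_eq pvPairsB pvFact_ne,
    pvMain (PySem.Str.strip text).toList.length _ le_rfl]
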